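-- pv_equiv track=rewrite | github.com/ankit-rane/Coding-Ninjas-DSA-100-days | 22. 1-3 Palindrome.py | palindrome13
-- ===== SOURCE A (Python) =====
-- def is_palindrome(s: str) -> bool:
--     return s == s[::-1]
--
-- def palindrome13(s: str) -> int:
--     n = len(s)
--
--     for i in range(1, n - 1):
--         for j in range(i + 1, n):
--             part1 = s[:i]
--             part2 = s[i:j]
--             part3 = s[j:]
--
--             new_str = part1 + part3
--
--             if is_palindrome(new_str):
--                 return 1
--
--     return 0
-- ===== SOURCE B (Python) =====
-- def palindrome13(s: str) -> int:
--     # Any removal s[:i]+s[j:] (1<=i<j<=n-1) keeps s[0] first and s[-1] last,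
--     # and i=1, j=n-1 leaves exactly s[0]+s[-1]; so the answer is a boundary check.
--     return 1 if len(s) >= 3 and s[0] == s[-1] else 0
-- ===== Notes on version B (the rewrite author's own statement) =====
-- stated objective: faster
-- what changed: Replaced the O(n^3) nested scan over all middle removals with an O(1) boundary check: any removal keeps s[0] first and s[-1] last, and removing s[1:n-1] leaves exactly those two characters, so the answer is 1 iff len(s)>=3 and s[0]==s[-1].
import Mathlib
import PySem

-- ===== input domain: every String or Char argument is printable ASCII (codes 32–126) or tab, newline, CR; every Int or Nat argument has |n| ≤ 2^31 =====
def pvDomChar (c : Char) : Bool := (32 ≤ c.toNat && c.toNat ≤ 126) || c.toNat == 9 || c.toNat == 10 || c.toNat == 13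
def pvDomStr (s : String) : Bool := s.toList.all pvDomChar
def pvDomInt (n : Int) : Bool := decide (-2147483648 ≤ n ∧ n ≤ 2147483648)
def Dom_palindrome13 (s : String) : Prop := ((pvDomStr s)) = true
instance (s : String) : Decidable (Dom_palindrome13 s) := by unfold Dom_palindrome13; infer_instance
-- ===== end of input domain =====

-- B replaces A's O(n^3) scan over all middle removals by a boundary check on s[0] and s[-1].
-- ===== PORT A =====
-- is_palindrome(s): s == s[::-1]  (s[::-1] ported exactly via PySem.List.slice?)
def pvIsPalindrome (l : List Char) : Bool :=
  l == ((PySem.List.slice? l none none (-1)).getD [])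

-- inner 'for j in range(i+1, n)': returns some 1 on the early 'return 1', none if the loop ends
def pvLoopJ (cs : List Char) (i : Int) (js : List Int) : Option Int :=
  match js with
  | [] => none
  | j :: rest =>
    let part1 := PySem.List.slice cs none (some i)      -- s[:i]
    let _part2 := PySem.List.slice cs (some i) (some j) -- s[i:j] (unused, as in A)
    let part3 := PySem.List.slice cs (some j) none      -- s[j:]
    let newStr := part1 ++ part3
    if pvIsPalindrome newStr then some 1 else pvLoopJ cs i rest

-- outer 'for i in range(1, n-1)'
def pvLoopI (cs : List Char) (n : Int) (is_ : List Int) : Int :=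
  match is_ with
  | [] => 0
  | i :: rest =>
    match pvLoopJ cs i (PySem.List.pyRange (i + 1) n 1) with
    | some r => r
    | none => pvLoopI cs n rest

def palindrome13 (s : String) : Int :=
  let cs := s.toList
  let n : Int := cs.length
  pvLoopI cs n (PySem.List.pyRange 1 (n - 1) 1)

-- ===== PORT B =====
def palindrome13_alt (s : String) : Int :=
  let cs := s.toList
  if decide (3 ≤ cs.length) && (PySem.List.pyGet? cs 0 == PySem.List.pyGet? cs (-1)) then 1 else 0

-- ===== PRECONDITION & SPEC =====
def Spec_palindrome13 (s : String) (out : Int) : Prop := out = palindrome13_alt s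
instance (s : String) (out : Int) : Decidable (Spec_palindrome13 s out) := by unfold Spec_palindrome13; infer_instance

-- ===== CLAIM (what is proved, stated in full; the proofs are below) =====
def Claim_equal_palindrome13 : Prop := ∀ (s : String), Dom_palindrome13 s → Spec_palindrome13 s (palindrome13 s)

-- ===== LEMMAS AND PROOFS =====
-- ===== VERDICT (by name: the statement is the Claim_ definition above) =====
-- is_palindrome is literally 'equal to its reverse'
theorem pvIsPalindrome_eq (l : List Char) : pvIsPalindrome l = (l == l.reverse) := by
  simp [pvIsPalindrome, PySem.List.slice?_none_none_neg_one]

-- the inner loop returns some 1 iff some j succeeds, else none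
theorem pvLoopJ_eq (cs : List Char) (i : Int) (js : List Int) :
    pvLoopJ cs i js =
      if js.any (fun j => pvIsPalindrome
          (PySem.List.slice cs none (some i) ++ PySem.List.slice cs (some j) none))
      then some 1 else none := by
  induction js with
  | nil => simp [pvLoopJ]
  | cons j rest ih =>
    by_cases h : pvIsPalindrome
        (PySem.List.slice cs none (some i) ++ PySem.List.slice cs (some j) none)
    · simp [pvLoopJ, h]
    · simp [pvLoopJ, h, ih]

-- the outer loop returns 1 iff some (i, j) succeeds, else 0
theorem pvLoopI_eq (cs : List Char) (n : Int) (is_ : List Int) :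
    pvLoopI cs n is_ =
      if is_.any (fun i => (PySem.List.pyRange (i + 1) n 1).any (fun j => pvIsPalindrome
          (PySem.List.slice cs none (some i) ++ PySem.List.slice cs (some j) none)))
      then 1 else 0 := by
  induction is_ with
  | nil => simp [pvLoopI]
  | cons i rest ih =>
    cases h : (PySem.List.pyRange (i + 1) n 1).any (fun j => pvIsPalindrome
        (PySem.List.slice cs none (some i) ++ PySem.List.slice cs (some j) none)) <;>
      simp only [pvLoopI, pvLoopJ_eq, h, ih, List.any_cons, if_true,
        Bool.false_or, Bool.true_or]
    rfl

-- a nonempty list equal to its reverse has equal first and last elements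
theorem head?_eq_getLast?_of_pal (l : List Char) (h : l = l.reverse) :
    l.head? = l.getLast? := by
  conv_lhs => rw [h]
  exact List.head?_reverse

-- getLast? survives dropping a prefix as long as something remains
theorem getLast?_drop_of_ne_nil (l : List Char) (k : Nat) (h : l.drop k ≠ []) :
    (l.drop k).getLast? = l.getLast? := by
  conv_rhs => rw [← List.take_append_drop k l]
  rw [List.getLast?_append_of_ne_nil _ h]

-- head? survives taking a nonempty prefix
theorem head?_take_of_pos (l : List Char) (k : Nat) (hk : 0 < k) :
    (l.take k).head? = l.head? := by
  cases l with
  | nil => simp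
  | cons c cs => cases k with
    | zero => omega
    | succ m => simp

-- the core characterisation: some middle removal is a palindrome iff the boundary check holds
theorem exists_removal_iff (cs : List Char) :
    (∃ i ∈ PySem.List.pyRange 1 ((cs.length : Int) - 1) 1,
      ∃ j ∈ PySem.List.pyRange (i + 1) (cs.length : Int) 1,
        pvIsPalindrome
          (PySem.List.slice cs none (some i) ++ PySem.List.slice cs (some j) none) = true)
    ↔ (3 ≤ cs.length ∧ cs.head? = cs.getLast?) := by
  constructor
  · rintro ⟨i, hi, j, hj, hpal⟩
    rw [PySem.List.mem_pyRange_one] at hi hj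
    have hlen : 3 ≤ cs.length := by omega
    have hne : cs ≠ [] := by intro h; simp [h] at hlen
    rw [pvIsPalindrome_eq, beq_iff_eq] at hpal
    have hpal' := head?_eq_getLast?_of_pal _ hpal
    rw [PySem.List.slice_to cs (by omega), PySem.List.slice_from cs (by omega)] at hpal'
    have htk : cs.take i.toNat ≠ [] := by
      simp only [ne_eq, List.take_eq_nil_iff, not_or]
      exact ⟨by omega, hne⟩
    have hdr : cs.drop j.toNat ≠ [] := by
      simp only [ne_eq, List.drop_eq_nil_iff]
      omega
    rw [List.head?_append_of_ne_nil _ htk, List.getLast?_append_of_ne_nil _ hdr,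
        head?_take_of_pos _ _ (by omega), getLast?_drop_of_ne_nil _ _ hdr] at hpal'
    exact ⟨hlen, hpal'⟩
  · rintro ⟨hlen, heq⟩
    have hne : cs ≠ [] := by intro h; simp [h] at hlen
    refine ⟨1, ?_, (cs.length : Int) - 1, ?_, ?_⟩
    · rw [PySem.List.mem_pyRange_one]; omega
    · rw [PySem.List.mem_pyRange_one]; omega
    · rw [PySem.List.slice_to cs (by omega), PySem.List.slice_from cs (by omega)]
      have h1 : ((1 : Int)).toNat = 1 := rfl
      have h2 : ((cs.length : Int) - 1).toNat = cs.length - 1 := by omega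
      rw [h1, h2, List.drop_length_sub_one hne]
      have htake : cs.take 1 = [cs.head hne] := by
        cases cs with
        | nil => exact absurd rfl hne
        | cons c t => simp [List.head]
      rw [htake, pvIsPalindrome_eq]
      have : cs.head hne = cs.getLast hne := by
        have := heq
        rw [List.head?_eq_some_head hne, List.getLast?_eq_some_getLast hne] at this
        exact Option.some.inj this
      simp [this]

-- B's boolean guard says exactly the same thing
theorem alt_cond_iff (cs : List Char) :
    (decide (3 ≤ cs.length) && (PySem.List.pyGet? cs 0 == PySem.List.pyGet? cs (-1))) = true
    ↔ (3 ≤ cs.length ∧ cs.head? = cs.getLast?) := by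
  constructor
  · rintro h
    simp only [Bool.and_eq_true, decide_eq_true_eq, beq_iff_eq] at h
    obtain ⟨hlen, heq⟩ := h
    refine ⟨hlen, ?_⟩
    have hne : cs ≠ [] := by intro h'; simp [h'] at hlen
    rw [show (0:Int) = ((0:Nat):Int) from rfl, PySem.List.pyGet?_natCast,
        PySem.List.pyGet?_neg_ofNat cs 1 (by omega) (by omega)] at heq
    rw [List.head?_eq_getElem?, heq, List.getLast?_eq_getElem?]
  · rintro ⟨hlen, heq⟩
    simp only [Bool.and_eq_true, decide_eq_true_eq, beq_iff_eq]
    refine ⟨hlen, ?_⟩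
    have hne : cs ≠ [] := by intro h'; simp [h'] at hlen
    rw [show (0:Int) = ((0:Nat):Int) from rfl, PySem.List.pyGet?_natCast,
        PySem.List.pyGet?_neg_ofNat cs 1 (by omega) (by omega)]
    rw [List.head?_eq_getElem?, List.getLast?_eq_getElem?] at heq
    exact heq

-- ===== VERDICT (by name: the statement is the Claim_ definition above) =====
theorem palindrome13_spec : Claim_equal_palindrome13 := by
  intro s _
  unfold Spec_palindrome13 palindrome13 palindrome13_alt
  simp only []
  rw [pvLoopI_eq]
  by_cases h : 3 ≤ s.toList.length ∧ s.toList.head? = s.toList.getLast?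
  · rw [if_pos, if_pos ((alt_cond_iff _).mpr h)]
    rw [List.any_eq_true]
    obtain ⟨i, hi, j, hj, hp⟩ := (exists_removal_iff _).mpr h
    exact ⟨i, hi, List.any_eq_true.mpr ⟨j, hj, hp⟩⟩
  · rw [if_neg, if_neg (fun hc => h ((alt_cond_iff _).mp hc))]
    intro hc
    apply h
    apply (exists_removal_iff _).mp
    rw [List.any_eq_true] at hc
    obtain ⟨i, hi, hany⟩ := hc
    rw [List.any_eq_true] at hany
    obtain ⟨j, hj, hp⟩ := hany
    exact ⟨i, hi, j, hj, hp⟩
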